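-- pv_equiv track=rewrite | github.com/slqye/42 | ready_set_boole/ex06.py | to_cnf_string
-- ===== SOURCE A (Python) =====
-- def to_cnf_string(value: str):
-- 	and_count: int = value.count("&")
-- 	result: str = ""
--
-- 	for i in value:
-- 		if (i != "&"):
-- 			result += i
-- 	result += and_count * "&"
-- 	return (result)
-- ===== SOURCE B (Python) =====
-- def to_cnf_string(value: str):
--     return "".join(sorted(value, key=lambda c: c == "&"))
-- ===== Notes on version B (the rewrite author's own statement) =====
-- stated objective: idiomatic
-- what changed: Replaces the filter-then-count-and-append loop with a single stable sort keyed on c == '&', which pushes the '&' characters to the end while preserving the order of the rest.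
import Mathlib
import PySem

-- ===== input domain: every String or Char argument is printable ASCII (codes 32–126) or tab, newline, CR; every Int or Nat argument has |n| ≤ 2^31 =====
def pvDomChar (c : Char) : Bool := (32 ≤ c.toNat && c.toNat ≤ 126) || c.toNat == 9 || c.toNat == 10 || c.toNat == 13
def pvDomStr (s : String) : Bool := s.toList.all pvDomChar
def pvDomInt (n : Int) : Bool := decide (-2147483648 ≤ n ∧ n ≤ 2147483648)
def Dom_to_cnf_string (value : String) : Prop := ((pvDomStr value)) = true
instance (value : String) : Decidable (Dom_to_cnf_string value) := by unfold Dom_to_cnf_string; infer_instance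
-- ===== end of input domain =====

-- B replaces A's filter loop + count-and-append with one stable sort keyed on c == '&' (objective: idiomatic).


-- ===== PORT A =====
-- and_count = value.count("&"); result = '' ; for i in value: if i != '&': result += i ; result += and_count * "&"
def to_cnf_string (value : String) : String :=
  let and_count : Int := (PySem.Str.count value "&" : Int)
  let result : List Char := value.toList.foldl (fun r i => if i != '&' then r ++ [i] else r) []
  String.ofList (result ++ PySem.List.pyRepeat ['&'] and_count)

-- ===== PORT B =====
-- "".join(sorted(value, key=lambda c: c == "&"))
def to_cnf_string_alt (value : String) : String :=
  String.ofList (PySem.List.sorted value.toList (fun c => c == '&') false)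

-- ===== PRECONDITION & SPEC =====
def Spec_to_cnf_string (value : String) (out : String) : Prop := out = to_cnf_string_alt value
instance (value : String) (out : String) : Decidable (Spec_to_cnf_string value out) := by unfold Spec_to_cnf_string; infer_instance

-- ===== CLAIM (what is proved, stated in full; the proofs are below) =====
def Claim_equal_to_cnf_string : Prop := ∀ (value : String), Dom_to_cnf_string value → Spec_to_cnf_string value (to_cnf_string value)

-- ===== LEMMAS AND PROOFS =====

-- substring count with a one-character needle is List.count
theorem countgo_singleton (c : Char) :
    ∀ (l : List Char) (fuel acc : Nat), l.length ≤ fuel →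
      PySem.Chars.count.go [c] fuel l acc = acc + l.count c := by
  intro l
  induction l with
  | nil => intro fuel acc _; cases fuel <;> simp [PySem.Chars.count.go]
  | cons h t ih =>
      intro fuel acc hf
      cases fuel with
      | zero => simp at hf
      | succ n =>
          have ht : t.length ≤ n := by simpa using hf
          by_cases hc : h = c
          · subst hc
            have hp : List.isPrefixOf [h] (h :: t) = true := by simp [List.isPrefixOf]
            simp [PySem.Chars.count.go, hp, ih n (acc + 1) ht]
            omega
          · have hp : List.isPrefixOf [c] (h :: t) = false := by
              simp [List.isPrefixOf]; exact fun e => hc e.symm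
            simp [PySem.Chars.count.go, hp, ih n acc ht, hc]

theorem count_singleton (s : List Char) (c : Char) :
    PySem.Chars.count s [c] = s.count c := by
  simp [PySem.Chars.count, countgo_singleton c s s.length 0 (le_refl _)]

theorem insertBy_cons {α : Type} (b : α → α → Bool) (x y : α) (ys : List α) :
    PySem.List.insertBy b x (y :: ys) =
      if b x y then x :: y :: ys else y :: PySem.List.insertBy b x ys := rfl

-- inserting '&' appends at the very end (its key is maximal)
theorem insertBy_amp (L : List Char) :
    PySem.List.insertBy (fun a b => decide ((a == '&') < (b == '&'))) '&' L = L ++ ['&'] := by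
  induction L with
  | nil => rfl
  | cons y ys ih =>
      rw [insertBy_cons]
      have : decide ((('&' : Char) == '&') < (y == '&')) = false := by
        cases hy : (y == '&') <;> simp
      simp [ih]

-- inserting a non-'&' lands right after the non-'&' prefix
theorem insertBy_nonamp (x : Char) (hx : (x == '&') = false) :
    ∀ (N A : List Char), (∀ c ∈ N, (c == '&') = false) → (∀ c ∈ A, (c == '&') = true) →
      PySem.List.insertBy (fun a b => decide ((a == '&') < (b == '&'))) x (N ++ A) =
        N ++ x :: A := by
  intro N
  induction N with
  | nil =>
      intro A _ hA
      cases A with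
      | nil => rfl
      | cons a A' =>
          rw [List.nil_append, insertBy_cons]
          have ha : (a == '&') = true := hA a (by simp)
          simp [hx, ha]
  | cons n N' ih =>
      intro A hN hA
      have hn : (n == '&') = false := hN n (by simp)
      rw [List.cons_append, insertBy_cons]
      simp [hx, hn, ih A (fun c hc => hN c (by simp [hc])) hA]

-- the insertion-sort fold partitions: non-'&' chars in order, then the '&'s
theorem sort_fold :
    ∀ (xs N A : List Char), (∀ c ∈ N, (c == '&') = false) → (∀ c ∈ A, (c == '&') = true) →
      xs.foldl (fun acc x =>
          PySem.List.insertBy (fun a b => decide ((a == '&') < (b == '&'))) x acc) (N ++ A) =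
        (N ++ xs.filter (fun c => c != '&')) ++ (A ++ xs.filter (fun c => c == '&')) := by
  intro xs
  induction xs with
  | nil => intro N A _ _; simp
  | cons x xs ih =>
      intro N A hN hA
      by_cases hx : (x == '&') = true
      · have hxe : x = '&' := by simpa using hx
        rw [List.foldl_cons]
        have : PySem.List.insertBy (fun a b => decide ((a == '&') < (b == '&'))) x (N ++ A)
            = N ++ (A ++ [x]) := by
          subst hxe; rw [insertBy_amp]; simp
        rw [this, ih N (A ++ [x]) hN (by
          intro c hc
          rcases List.mem_append.mp hc with h | h
          · exact hA c h
          · simp at h; simp [h, hxe])]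
        simp [hxe]
      · have hx' : (x == '&') = false := by simpa using hx
        rw [List.foldl_cons, insertBy_nonamp x hx' N A hN hA]
        have : N ++ x :: A = (N ++ [x]) ++ A := by simp
        rw [this, ih (N ++ [x]) A (by
          intro c hc
          rcases List.mem_append.mp hc with h | h
          · exact hN c h
          · simp at h; simp [h, hx']) hA]
        have hne : x ≠ '&' := by simpa using hx'
        simp [hx', hne]

theorem sorted_amp (xs : List Char) :
    PySem.List.sorted xs (fun c => c == '&') false =
      xs.filter (fun c => c != '&') ++ xs.filter (fun c => c == '&') := by
  rw [PySem.List.sorted_eq_foldl_insertBy]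
  simpa using sort_fold xs [] [] (by simp) (by simp)

theorem foldl_A_eq_filter (xs : List Char) (acc : List Char) :
    xs.foldl (fun r i => if i = '&' then r else r ++ [i]) acc =
      acc ++ xs.filter (fun c => c != '&') := by
  induction xs generalizing acc with
  | nil => simp
  | cons h t ih =>
      by_cases hh : h = '&'
      · simp [hh, ih]
      · simp [hh, ih, List.append_assoc]

theorem filter_amp_eq_replicate (xs : List Char) :
    xs.filter (fun c => c == '&') = List.replicate (xs.count '&') '&' := by
  induction xs with
  | nil => rfl
  | cons h t ih =>
      by_cases hh : h = '&'
      · subst hh; simp [List.replicate_succ, ih]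
      · simp [hh, ih]

-- ===== VERDICT (by name: the statement is the Claim_ definition above) =====
theorem to_cnf_string_spec : Claim_equal_to_cnf_string := by
  intro value _
  unfold Spec_to_cnf_string
  simp [to_cnf_string, to_cnf_string_alt, sorted_amp, filter_amp_eq_replicate,
    PySem.List.pyRepeat_singleton, foldl_A_eq_filter, count_singleton]
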